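-- pv_equiv track=rewrite | github.com/nexuswho/litcoder | python/Module 3/Lab 1/cookies.py | candies_steps
-- ===== SOURCE A (Python) =====
-- import heapq
--
-- def candies_steps(target, candies):
--     heapq.heapify(candies)  # Convert the candies list into a min-heap
--
--     steps = 0
--     while len(candies) > 1:
--         least_sweet = heapq.heappop(candies)
--         second_least_sweet = heapq.heappop(candies)
--         new_sweetness = least_sweet + 2 * second_least_sweet
--         heapq.heappush(candies, new_sweetness)
--         steps += 1
--
--         if candies[0] >= target:
--             break
--
--     return steps
-- ===== SOURCE B (Python) =====
-- def candies_steps(target, candies):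
--     lst = sorted(candies)
--     steps = 0
--     while len(lst) > 1:
--         a, b = lst[0], lst[1]
--         rest = lst[2:]
--         new = a + 2 * b
--         i = 0
--         while i < len(rest) and rest[i] <= new:
--             i += 1
--         rest.insert(i, new)
--         lst = rest
--         steps += 1
--         if lst[0] >= target:
--             break
--     return steps
-- ===== Notes on version B (the rewrite author's own statement) =====
-- stated objective: alternative
-- what changed: Replaces A's binary min-heap (heapify/heappop/heappush, mutating the argument) with a sort-once then maintain-a-sorted-list loop: the two smallest values are read off the front and the combined value is linearly inserted back in order; equivalence is about the return value only since A mutates `candies` in place and B does not.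
import Mathlib
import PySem

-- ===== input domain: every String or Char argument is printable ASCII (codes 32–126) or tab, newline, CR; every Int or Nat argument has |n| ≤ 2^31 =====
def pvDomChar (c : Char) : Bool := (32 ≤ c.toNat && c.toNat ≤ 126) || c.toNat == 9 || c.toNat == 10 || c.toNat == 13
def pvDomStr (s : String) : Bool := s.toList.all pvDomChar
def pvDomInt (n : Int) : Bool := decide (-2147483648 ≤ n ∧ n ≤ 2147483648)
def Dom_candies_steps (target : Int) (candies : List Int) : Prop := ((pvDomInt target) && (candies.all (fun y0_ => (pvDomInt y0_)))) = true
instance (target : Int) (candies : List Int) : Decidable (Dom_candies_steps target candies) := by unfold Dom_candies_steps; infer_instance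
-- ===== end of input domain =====

-- B replaces A's binary heap by a sorted list rebuilt per step (pop the two front
-- values, linear-insert the combined one); objective: alternative. Equivalence is
-- about the RETURN value only: A mutates `candies` in place (heapify/pops/pushes),
-- B leaves the argument untouched.

-- ===== PORT A =====
-- heapq is ported value-faithfully: heappop removes a minimum value, the heap root
-- candies[0] is the minimum value; only values are ever read, so this is exact.
def candiesLoopA (target : Int) (c : List Int) (steps : Int) : Int :=
  if h : 1 < c.length then
    let a := (c.min?).getD 0
    let c1 := c.erase a
    let b := (c1.min?).getD 0
    let c2 := c1.erase b
    let c3 := c2 ++ [a + 2 * b]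
    if ((c3.min?).getD 0) ≥ target then steps + 1
    else candiesLoopA target c3 (steps + 1)
  else steps
termination_by c.length
decreasing_by
  have hc : c ≠ [] := by intro e; simp [e] at h
  have ha : ((c.min?).getD 0) ∈ c := by
    cases hm : c.min? with
    | none => exact absurd (List.min?_eq_none_iff.mp hm) hc
    | some m => simpa [hm] using List.min?_mem hm
  have h1 : (c.erase ((c.min?).getD 0)).length = c.length - 1 :=
    List.length_erase_of_mem ha
  have hc1 : c.erase ((c.min?).getD 0) ≠ [] := by
    intro e
    have := congrArg List.length e
    simp [h1] at this; omega
  have hb : (((c.erase ((c.min?).getD 0)).min?).getD 0) ∈ c.erase ((c.min?).getD 0) := by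
    cases hm : (c.erase ((c.min?).getD 0)).min? with
    | none => exact absurd (List.min?_eq_none_iff.mp hm) hc1
    | some m => simpa [hm] using List.min?_mem hm
  have h2 := List.length_erase_of_mem hb
  simp only [List.length_append, List.length_cons, List.length_nil, h2, h1]
  omega

def candies_steps (target : Int) (candies : List Int) : Int :=
  candiesLoopA target candies 0

-- ===== PORT B =====
-- linear insertion of x into a sorted list, after equal elements (Source B's inner while)
def insortB (x : Int) (l : List Int) : List Int :=
  match l with
  | [] => [x]
  | y :: ys => if x < y then x :: y :: ys else y :: insortB x ys

theorem length_insortB (x : Int) (l : List Int) :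
    (insortB x l).length = l.length + 1 := by
  induction l with
  | nil => rfl
  | cons y ys ih => simp only [insortB]; split <;> simp [ih]

def candiesLoopB (target : Int) (l : List Int) (steps : Int) : Int :=
  match l with
  | a :: b :: rest =>
    let l' := insortB (a + 2 * b) rest
    if (l'.headD 0) ≥ target then steps + 1
    else candiesLoopB target l' (steps + 1)
  | _ => steps
termination_by l.length
decreasing_by simp [length_insortB]

def candies_steps_alt (target : Int) (candies : List Int) : Int :=
  candiesLoopB target (PySem.List.sorted candies (fun x => x) false) 0

-- ===== PRECONDITION & SPEC =====
def Spec_candies_steps (target : Int) (candies : List Int) (out : Int) : Prop := out = candies_steps_alt target candies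
instance (target : Int) (candies : List Int) (out : Int) : Decidable (Spec_candies_steps target candies out) := by unfold Spec_candies_steps; infer_instance

-- ===== CLAIM (what is proved, stated in full; the proofs are below) =====
def Claim_equal_candies_steps : Prop := ∀ (target : Int) (candies : List Int), Dom_candies_steps target candies → Spec_candies_steps target candies (candies_steps target candies)

-- ===== LEMMAS AND PROOFS =====

theorem insortB_perm (x : Int) (l : List Int) : (insortB x l).Perm (x :: l) := by
  induction l with
  | nil => exact List.Perm.refl _
  | cons y ys ih =>
    simp only [insortB]
    split
    · exact List.Perm.refl _
    · exact (List.Perm.cons y ih).trans (List.Perm.swap x y ys)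

theorem insortB_sorted (x : Int) (l : List Int) (h : l.Pairwise (· ≤ ·)) :
    (insortB x l).Pairwise (· ≤ ·) := by
  induction l with
  | nil => simp [insortB]
  | cons y ys ih =>
    simp only [insortB]
    have hy : ∀ z ∈ ys, y ≤ z := (List.pairwise_cons.mp h).1
    have hys : ys.Pairwise (· ≤ ·) := (List.pairwise_cons.mp h).2
    split
    · rename_i hlt
      refine List.pairwise_cons.mpr ⟨?_, h⟩
      intro z hz
      rcases List.mem_cons.mp hz with hz | hz
      · exact le_of_lt (hz ▸ hlt)
      · exact le_of_lt (lt_of_lt_of_le hlt (hy z hz))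
    · rename_i hge
      refine List.pairwise_cons.mpr ⟨?_, ih hys⟩
      intro z hz
      rcases List.mem_cons.mp ((insortB_perm x ys).mem_iff.mp hz) with hz | hz
      · subst hz; omega
      · exact hy z hz

-- the minimum of any permutation of a sorted list a :: t is a
theorem min?_perm_sorted {c : List Int} {a : Int} {t : List Int}
    (hp : c.Perm (a :: t)) (hs : (a :: t).Pairwise (· ≤ ·)) : c.min? = some a := by
  rw [List.min?_eq_some_iff]
  refine ⟨hp.mem_iff.mpr List.mem_cons_self, ?_⟩
  intro x hx
  rcases List.mem_cons.mp (hp.mem_iff.mp hx) with hx' | hx'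
  · omega
  · exact (List.pairwise_cons.mp hs).1 x hx'

theorem loopA_eq_loopB (target : Int) :
    ∀ (n : Nat) (c d : List Int) (steps : Int), c.length ≤ n → c.Perm d →
      d.Pairwise (· ≤ ·) → candiesLoopA target c steps = candiesLoopB target d steps := by
  intro n
  induction n with
  | zero =>
    intro c d steps hn hp _
    have hc : c = [] := List.length_eq_zero_iff.mp (Nat.le_zero.mp hn)
    subst hc
    have hd : d = [] := hp.symm.eq_nil
    subst hd
    simp [candiesLoopA, candiesLoopB]
  | succ n ih =>
    intro c d steps hn hp hs
    match d with
    | [] =>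
      have hc : c = [] := hp.eq_nil
      subst hc; simp [candiesLoopA, candiesLoopB]
    | [a] =>
      have hl : c.length = 1 := by simpa using hp.length_eq
      rw [candiesLoopA]
      simp [hl, candiesLoopB]
    | a :: b :: rest =>
      have hl : 1 < c.length := by
        have := hp.length_eq; simp at this; omega
      have hmin : c.min? = some a := min?_perm_sorted hp hs
      have hsbr : (b :: rest).Pairwise (· ≤ ·) := (List.pairwise_cons.mp hs).2
      have hp1 : (c.erase a).Perm (b :: rest) := by
        have := hp.erase a
        simpa using this
      have hmin1 : (c.erase a).min? = some b := min?_perm_sorted hp1 hsbr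
      have hp2 : ((c.erase a).erase b).Perm rest := by
        have := hp1.erase b
        simpa using this
      have hsr : rest.Pairwise (· ≤ ·) := (List.pairwise_cons.mp hsbr).2
      set nw := a + 2 * b with hnw
      have hp3 : (((c.erase a).erase b) ++ [nw]).Perm (insortB nw rest) := by
        refine List.Perm.trans ?_ (insortB_perm nw rest).symm
        exact (List.perm_append_singleton nw _).trans (List.Perm.cons nw hp2)
      have hs3 : (insortB nw rest).Pairwise (· ≤ ·) := insortB_sorted nw rest hsr
      -- insortB is nonempty
      obtain ⟨m, tl, hmt⟩ : ∃ m tl, insortB nw rest = m :: tl := by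
        cases hins : insortB nw rest with
        | nil =>
          have := congrArg List.length hins
          simp [length_insortB] at this
        | cons m tl => exact ⟨m, tl, rfl⟩
      have hmin3 : (((c.erase a).erase b) ++ [nw]).min? = some m :=
        min?_perm_sorted (hmt ▸ hp3) (hmt ▸ hs3)
      rw [candiesLoopA, candiesLoopB]
      simp only [hl, dif_pos, hmin, hmin1, Option.getD_some, hmt, List.headD_cons, ← hnw, hmin3]
      split
      · rfl
      · -- recurse
        have hlen : (((c.erase a).erase b) ++ [nw]).length ≤ n := by
          have h1 : (c.erase a).length = c.length - 1 :=
            List.length_erase_of_mem (hp.mem_iff.mpr List.mem_cons_self)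
          have h2 : ((c.erase a).erase b).length = (c.erase a).length - 1 :=
            List.length_erase_of_mem (hp1.mem_iff.mpr List.mem_cons_self)
          simp only [List.length_append, List.length_cons, List.length_nil, h2, h1]
          omega
        rw [hmt] at hp3 hs3
        exact ih _ _ _ hlen hp3 hs3

theorem sorted_sorts (candies : List Int) :
    (PySem.List.sorted candies (fun x => x) false).Perm candies ∧
      (PySem.List.sorted candies (fun x => x) false).Pairwise (· ≤ ·) := by
  refine ⟨PySem.List.sorted_perm _ _ _, ?_⟩
  have := PySem.List.sorted_pairwise (xs := candies) (key := fun x => x)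
  simpa using this

-- ===== VERDICT (by name: the statement is the Claim_ definition above) =====
theorem candies_steps_spec : Claim_equal_candies_steps := by
  intro target candies _
  unfold Spec_candies_steps candies_steps candies_steps_alt
  obtain ⟨hperm, hsort⟩ := sorted_sorts candies
  exact loopA_eq_loopB target candies.length candies _ 0 le_rfl hperm.symm hsort
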